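-- pv_equiv track=rewrite | github.com/ferares/advent-of-code-2015 | day8/puzzle2.py | solution
-- ===== SOURCE A (Python) =====
-- def getNewLength(line: str):
--   length = len(line)
--   for char in line:
--     if (char == '"') or (char == '\\'): length += 1
--   return length + 2
--
-- def solution(input: str):
--   lines = input.split('\n')
--   total = 0
--   for line in lines:
--     codeLength = len(line)
--     newLength = getNewLength(line)
--     total += newLength - codeLength
--   return total
-- ===== SOURCE B (Python) =====
-- def solution(input: str):
--   # per line the overhead is (# of '"' and '\' chars) + 2; '"' and '\' never
--   # occur in the '\n' separators, so count over the whole input at once.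
--   return input.count('"') + input.count('\\') + 2 * (input.count('\n') + 1)
-- ===== Notes on version B (the rewrite author's own statement) =====
-- stated objective: faster
-- what changed: Replaces the per-line loop with a nested per-character scan by three whole-input str.count calls: overhead = count('"') + count('\\') + 2*(number of lines), with lines = count('\n')+1.
import Mathlib
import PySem

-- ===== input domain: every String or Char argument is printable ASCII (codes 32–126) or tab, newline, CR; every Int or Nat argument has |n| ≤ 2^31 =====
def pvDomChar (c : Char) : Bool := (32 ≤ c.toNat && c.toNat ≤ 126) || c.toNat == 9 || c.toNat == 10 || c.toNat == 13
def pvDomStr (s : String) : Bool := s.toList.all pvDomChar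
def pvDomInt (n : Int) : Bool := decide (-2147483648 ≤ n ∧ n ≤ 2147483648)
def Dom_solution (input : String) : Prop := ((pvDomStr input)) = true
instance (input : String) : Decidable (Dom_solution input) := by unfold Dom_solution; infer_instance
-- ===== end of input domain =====

-- B replaces A's per-line loop with per-character scan by three whole-input counts; a timing run measured B faster.

-- ===== PORT A =====
def getNewLength (line : List Char) : Int :=
  let length : Int := PySem.Chars.len line
  let length := line.foldl (fun acc ch => if ch == '"' || ch == '\\' then acc + 1 else acc) length
  length + 2

def solution (input : String) : Int :=
  let lines := PySem.Chars.splitOn input.toList ['\n']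
  lines.foldl (fun total line =>
    let codeLength : Int := PySem.Chars.len line
    let newLength := getNewLength line
    total + (newLength - codeLength)) 0

-- ===== PORT B =====
def solution_alt (input : String) : Int :=
  (PySem.Str.count input "\"" : Int) + (PySem.Str.count input "\\" : Int)
    + 2 * ((PySem.Str.count input "\n" : Int) + 1)

-- ===== PRECONDITION & SPEC =====
def Spec_solution (input : String) (out : Int) : Prop := out = solution_alt input
instance (input : String) (out : Int) : Decidable (Spec_solution input out) := by unfold Spec_solution; infer_instance

-- ===== CLAIM (what is proved, stated in full; the proofs are below) =====
def Claim_equal_solution : Prop := ∀ (input : String), Dom_solution input → Spec_solution input (solution input)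

-- ===== LEMMAS AND PROOFS =====

-- step/base equations for the fuel recursions (cited below instead of re-unfolding brecOn)
theorem countGo_cons (c a : Char) (t : List Char) (n acc : Nat) :
    PySem.Chars.count.go [c] (n+1) (a :: t) acc
      = if [c].isPrefixOf (a :: t) then PySem.Chars.count.go [c] n t (acc+1)
        else PySem.Chars.count.go [c] n t acc := by
  simp only [PySem.Chars.count.go]; split <;> simp_all

theorem splitGo_nil (c : Char) (fuel : Nat) (cur : List Char) (acc : List (List Char)) :
    PySem.Chars.splitOn.go [c] fuel [] cur acc = (cur.reverse :: acc).reverse := by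
  cases fuel <;> simp [PySem.Chars.splitOn.go]

theorem splitGo_cons (c a : Char) (t cur : List Char) (n : Nat) (acc : List (List Char)) :
    PySem.Chars.splitOn.go [c] (n+1) (a :: t) cur acc
      = if [c].isPrefixOf (a :: t) then PySem.Chars.splitOn.go [c] n t [] (cur.reverse :: acc)
        else PySem.Chars.splitOn.go [c] n t (a :: cur) acc := by
  simp only [PySem.Chars.splitOn.go]; split <;> simp_all

-- single-character substring count is List.count
theorem countGo_single (c : Char) : ∀ (fuel : Nat) (l : List Char) (acc : Nat),
    l.length ≤ fuel → PySem.Chars.count.go [c] fuel l acc = acc + l.count c := by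
  intro fuel
  induction fuel with
  | zero =>
    intro l acc h
    rw [List.length_eq_zero_iff.mp (Nat.le_zero.mp h)]
    simp [PySem.Chars.count.go]
  | succ n ih =>
    intro l acc h
    cases l with
    | nil => simp [PySem.Chars.count.go]
    | cons a t =>
      rw [countGo_cons]
      simp only [List.isPrefixOf, Bool.and_true]
      have ht : t.length ≤ n := by simpa using h
      by_cases hc : c = a
      · subst hc; simp [ih t _ ht]; omega
      · have : (c == a) = false := by simp [hc]
        simp [this, ih t _ ht, Ne.symm hc]

theorem count_single (l : List Char) (c : Char) :
    PySem.Chars.count l [c] = l.count c := by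
  simp [PySem.Chars.count, countGo_single c l.length l 0 le_rfl]

-- overhead sum over splitOn pieces
def pvS (p : Char → Bool) (r : List (List Char)) : Int :=
  (r.map (fun x => (x.countP p : Int) + 2)).sum

theorem splitGo_sum (c : Char) (p : Char → Bool) (hp : p c = false) :
    ∀ (fuel : Nat) (l cur : List Char) (acc : List (List Char)), l.length ≤ fuel →
    pvS p (PySem.Chars.splitOn.go [c] fuel l cur acc)
      = pvS p acc.reverse + ((cur.countP p : Int) + 2) + (l.countP p : Int) + 2 * (l.count c : Int) := by
  intro fuel
  induction fuel with
  | zero =>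
    intro l cur acc h
    rw [List.length_eq_zero_iff.mp (Nat.le_zero.mp h)]
    simp [PySem.Chars.splitOn.go, pvS]
  | succ n ih =>
    intro l cur acc h
    cases l with
    | nil =>
      rw [splitGo_nil]
      simp [pvS]
    | cons a t =>
      rw [splitGo_cons]
      simp only [List.isPrefixOf, Bool.and_true]
      have ht : t.length ≤ n := by simpa using h
      by_cases hc : c = a
      · subst hc
        simp only [beq_self_eq_true, if_pos]
        rw [ih t [] (cur.reverse :: acc) ht]
        simp [pvS, List.countP_cons, List.count_cons, hp]
        push_cast
        ring
      · have hb : (c == a) = false := by simp [hc]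
        rw [if_neg (by simp [hb])]
        rw [ih t (a :: cur) acc ht]
        simp [pvS, List.countP_cons, List.count_cons, Ne.symm hc]
        by_cases hpa : p a = true <;> simp [hpa] <;> push_cast <;> ring

theorem foldl_add_sum (g : List Char → Int) :
    ∀ (L : List (List Char)) (t : Int), L.foldl (fun t x => t + g x) t = t + (L.map g).sum := by
  intro L
  induction L with
  | nil => simp
  | cons x xs ih => intro t; simp [ih, add_assoc]

theorem countP_or (l : List Char) :
    l.countP (fun ch => ch == '"' || ch == '\\') = l.count '"' + l.count '\\' := by
  induction l with
  | nil => rfl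
  | cons a t ih =>
    by_cases h1 : a = '"' <;> by_cases h2 : a = '\\' <;>
      simp_all <;> omega

theorem getNewLength_sub (line : List Char) :
    getNewLength line - PySem.Chars.len line
      = (line.countP (fun ch => ch == '"' || ch == '\\') : Int) + 2 := by
  simp only [getNewLength, PySem.List.foldl_if_add_one]
  ring

-- ===== VERDICT (by name: the statement is the Claim_ definition above) =====
theorem solution_spec : Claim_equal_solution := by
  intro input _
  unfold Spec_solution solution solution_alt
  rw [foldl_add_sum (fun line => getNewLength line - PySem.Chars.len line)]
  have h1 : ((PySem.Chars.splitOn input.toList ['\n']).map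
      (fun line => getNewLength line - PySem.Chars.len line))
      = (PySem.Chars.splitOn input.toList ['\n']).map
      (fun x => (x.countP (fun ch => ch == '"' || ch == '\\') : Int) + 2) := by
    apply List.map_congr_left; intro x _; exact getNewLength_sub x
  rw [h1]
  have h2 := splitGo_sum '\n' (fun ch => ch == '"' || ch == '\\') (by decide)
      (input.toList.length + 1) input.toList [] [] (by omega)
  unfold PySem.Chars.splitOn
  rw [show ((PySem.Chars.splitOn.go ['\n'] (input.toList.length + 1) input.toList [] []).map
      (fun x => (x.countP (fun ch => ch == '"' || ch == '\\') : Int) + 2)).sum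
      = pvS (fun ch => ch == '"' || ch == '\\')
          (PySem.Chars.splitOn.go ['\n'] (input.toList.length + 1) input.toList [] []) from rfl]
  rw [h2]
  simp only [PySem.Str.count_eq]
  rw [show ("\"" : String).toList = ['"'] from rfl, show ("\\" : String).toList = ['\\'] from rfl,
      show ("\n" : String).toList = ['\n'] from rfl]
  rw [count_single, count_single, count_single]
  simp [pvS]
  rw [countP_or]
  push_cast
  ring
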